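-- pv_equiv track=rewrite | github.com/aeon-toolkit/aeon | aeon/benchmarking/metrics/anomaly_detection/range_metrics.py | _binary_to_ranges
-- ===== SOURCE A (Python) =====
-- def _binary_to_ranges(binary_sequence):
--     """
--     Convert a binary sequence to a list of anomaly ranges.
--
--     Parameters
--     ----------
--     binary_sequence : list
--         Binary sequence where 1 indicates anomaly and 0 indicates normal.
--
--     Returns
--     -------
--     list of tuples
--         List of anomaly ranges as (start, end) tuples.
--
--     """
--     ranges = []
--     start = None
--
--     for i, val in enumerate(binary_sequence):
--         if val and start is None:
--             start = i
--         elif not val and start is not None: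
--             ranges.append((start, i - 1))
--             start = None
--
--     if start is not None:
--         ranges.append((start, len(binary_sequence) - 1))
--
--     return ranges
-- ===== SOURCE B (Python) =====
-- def _binary_to_ranges(binary_sequence):
--     """Run-segmentation rewrite: split into maximal constant-truthiness runs."""
--     ranges = []
--     i = 0
--     n = len(binary_sequence)
--     while i < n:
--         key = bool(binary_sequence[i])
--         j = i + 1
--         while j < n and bool(binary_sequence[j]) == key:
--             j += 1
--         if key:
--             ranges.append((i, j - 1))
--         i = j
--     return ranges
-- ===== Notes on version B (the rewrite author's own statement) =====
-- stated objective: alternative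
-- what changed: Replaces the start-sentinel state machine with trailing flush by a two-pointer run segmentation: each maximal constant-truthiness run is found in one inner scan and emitted directly if anomalous.
import Mathlib
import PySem

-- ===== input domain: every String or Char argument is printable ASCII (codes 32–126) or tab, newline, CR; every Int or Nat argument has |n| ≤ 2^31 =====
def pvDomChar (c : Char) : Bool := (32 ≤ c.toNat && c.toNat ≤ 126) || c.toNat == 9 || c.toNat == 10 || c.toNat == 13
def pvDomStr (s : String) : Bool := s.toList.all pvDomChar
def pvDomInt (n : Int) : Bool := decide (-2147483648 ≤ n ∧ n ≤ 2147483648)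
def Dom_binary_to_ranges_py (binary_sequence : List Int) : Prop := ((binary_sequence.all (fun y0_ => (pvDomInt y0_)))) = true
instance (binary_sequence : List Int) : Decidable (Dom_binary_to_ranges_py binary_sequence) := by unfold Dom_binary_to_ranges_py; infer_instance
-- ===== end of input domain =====

-- ===== PORT A =====
-- loop of A: state (i, start, ranges); final flush when start ≠ none.
def pvLoopA (i : Int) (start : Option Int) (acc : List (Int × Int)) : List Int → List (Int × Int)
  | [] =>
    match start with
    | some s => acc ++ [(s, i - 1)]
    | none => acc
  | x :: xs =>
    if x ≠ 0 then
      match start with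
      | none => pvLoopA (i + 1) (some i) acc xs
      | some s => pvLoopA (i + 1) (some s) acc xs
    else
      match start with
      | some s => pvLoopA (i + 1) none (acc ++ [(s, i - 1)]) xs
      | none => pvLoopA (i + 1) none acc xs

def binary_to_ranges_py (binary_sequence : List Int) : List (Int × Int) :=
  pvLoopA 0 none [] binary_sequence

-- ===== PORT B =====
-- B: split off the maximal run with the same truthiness as the head, emit it if anomalous.
def pvAltGo (idx : Int) (l : List Int) : List (Int × Int) :=
  match l with
  | [] => []
  | x :: xs =>
    let k : Bool := x != 0
    let run := xs.takeWhile (fun y => (y != 0) == k)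
    let rest := xs.dropWhile (fun y => (y != 0) == k)
    let len : Int := (run.length : Int) + 1
    let tail := pvAltGo (idx + len) rest
    if k then (idx, idx + len - 1) :: tail else tail
termination_by l.length
decreasing_by
  simpa using Nat.lt_succ_of_le (List.length_dropWhile_le _ xs)

def binary_to_ranges_py_alt (binary_sequence : List Int) : List (Int × Int) :=
  pvAltGo 0 binary_sequence

-- ===== PRECONDITION & SPEC =====
def Spec_binary_to_ranges_py (binary_sequence : List Int) (out : List (Int × Int)) : Prop := out = binary_to_ranges_py_alt binary_sequence
instance (binary_sequence : List Int) (out : List (Int × Int)) : Decidable (Spec_binary_to_ranges_py binary_sequence out) := by unfold Spec_binary_to_ranges_py; infer_instance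

-- ===== CLAIM (what is proved, stated in full; the proofs are below) =====
def Claim_equal_binary_to_ranges_py : Prop := ∀ (binary_sequence : List Int), Dom_binary_to_ranges_py binary_sequence → Spec_binary_to_ranges_py binary_sequence (binary_to_ranges_py binary_sequence)

-- ===== LEMMAS AND PROOFS =====

-- Skipping one leading zero is the same as letting pvAltGo skip the whole zero run.
theorem pvAltGo_zero_cons (i : Int) (xs : List Int) :
    pvAltGo i (0 :: xs) = pvAltGo (i + 1) xs := by
  cases xs with
  | nil => simp [pvAltGo]
  | cons y ys =>
    by_cases hy : y = 0
    · subst hy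
      conv_lhs => rw [pvAltGo]
      conv_rhs => rw [pvAltGo]
      simp only [List.takeWhile_cons, List.dropWhile_cons]
      norm_num
      ring_nf
    · have hyb : (y != 0) = true := by simpa using hy
      conv_lhs => rw [pvAltGo]
      simp only [List.takeWhile_cons, List.dropWhile_cons, hyb]
      norm_num

-- Joint characterisation of A's loop in its two sentinel states.
theorem pvLoopA_char (l : List Int) :
    (∀ (i : Int) (acc : List (Int × Int)),
        pvLoopA i none acc l = acc ++ pvAltGo i l) ∧
    (∀ (i s : Int) (acc : List (Int × Int)),
        pvLoopA i (some s) acc l =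
          acc ++ (s, i + ((l.takeWhile (fun y => y != 0)).length : Int) - 1) ::
            pvAltGo (i + ((l.takeWhile (fun y => y != 0)).length : Int))
              (l.dropWhile (fun y => y != 0))) := by
  induction l with
  | nil => simp [pvLoopA, pvAltGo]
  | cons x xs ih =>
    obtain ⟨ihP, ihQ⟩ := ih
    constructor
    · intro i acc
      by_cases hx : x = 0
      · subst hx
        simp only [pvLoopA]
        norm_num
        rw [ihP, pvAltGo_zero_cons]
      · have hxb : (x != 0) = true := by simpa using hx
        simp only [pvLoopA, if_pos hx]
        rw [ihQ]
        conv_rhs => rw [pvAltGo]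
        simp only [hxb]
        norm_num
        constructor
        · ring
        · ring_nf
    · intro i s acc
      by_cases hx : x = 0
      · subst hx
        simp only [pvLoopA]
        norm_num
        rw [ihP, pvAltGo_zero_cons]
        simp
      · have hxb : (x != 0) = true := by simpa using hx
        simp only [pvLoopA, if_pos hx]
        rw [ihQ]
        simp only [List.takeWhile_cons, List.dropWhile_cons, hxb, if_true, List.length_cons]
        push_cast
        ring_nf

-- ===== VERDICT (by name: the statement is the Claim_ definition above) =====
theorem binary_to_ranges_py_spec : Claim_equal_binary_to_ranges_py := by
  intro l _
  unfold Spec_binary_to_ranges_py binary_to_ranges_py binary_to_ranges_py_alt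
  simpa using (pvLoopA_char l).1 0 []
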